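-- pv_equiv track=rewrite | github.com/miliar/Code_Jam_Webscraper | solutions_python/Problem_181/980.py | f
-- ===== SOURCE A (Python) =====
-- def f(s):
-- 	a = s[0]
-- 	for i in s[1:]:
-- 		if ord(i) >= ord(a[0]):
-- 			a = i + a
-- 		else:
-- 			a = a + i
-- 	return a
-- ===== SOURCE B (Python) =====
-- def f(s):
--     # Stage 1: prefix-maximum array pm, pm[i] = max(s[:i+1]).
--     pm = [s[0]]
--     for c in s[1:]:
--         pm.append(max(pm[-1], c))
--     # Stage 2/3: partition s[1:] against the prefix max to its LEFT (pm shifted by one),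
--     # then assemble the answer in one final concatenation.
--     zipped = list(zip(s[1:], pm))
--     front = [c for c, p in zipped if c >= p]
--     back = [c for c, p in zipped if c < p]
--     return ''.join(reversed(front)) + s[0] + ''.join(back)
-- ===== Notes on version B (the rewrite author's own statement) =====
-- stated objective: faster
-- what changed: B replaces A's online loop that rebuilds the answer string by repeated prepend/append with staged passes: it first precomputes a prefix-maximum array, then partitions the remaining characters by comparing each against the prefix maximum to its left, and assembles the result once at the end.
import Mathlib
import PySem

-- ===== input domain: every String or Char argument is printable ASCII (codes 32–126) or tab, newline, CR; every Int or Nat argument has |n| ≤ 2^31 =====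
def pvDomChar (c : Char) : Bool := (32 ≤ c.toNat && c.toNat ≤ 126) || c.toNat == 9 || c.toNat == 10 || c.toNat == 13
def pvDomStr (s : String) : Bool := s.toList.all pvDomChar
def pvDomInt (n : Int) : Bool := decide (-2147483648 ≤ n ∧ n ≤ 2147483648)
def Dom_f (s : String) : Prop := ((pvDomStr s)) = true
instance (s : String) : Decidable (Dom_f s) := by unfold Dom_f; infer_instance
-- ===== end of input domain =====

-- B replaces A's repeated prepend/append string rebuilding with staged passes: a precomputed
-- prefix-maximum array, a partition of the tail against it, and one final assembly (faster:
-- linear instead of quadratic string rebuilding).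

-- ===== PORT A =====
-- A's loop: a starts as s[0]; each char is prepended when ord(i) >= ord(a[0]), else appended.
def fLoopA (rest : List Char) (a : List Char) : List Char :=
  match rest with
  | [] => a
  | i :: t => if a.headI.toNat ≤ i.toNat then fLoopA t (i :: a) else fLoopA t (a ++ [i])

def f (s : String) : String :=
  match s.toList with
  | [] => ""   -- Python raises IndexError on s[0] here; excluded by Pre_f
  | c :: rest => String.ofList (fLoopA rest [c])

-- ===== PORT B =====
-- Python's max(a, b) on chars: b if a < b else a (code-point order on this domain).
def pymax (a b : Char) : Char := if a.toNat < b.toNat then b else a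

-- Stage 1 of B: build the prefix-maximum array pm (pm is never empty, so pm[-1] = getLast;
-- the getLastD default is never used).
def pmLoop (rest : List Char) (pm : List Char) : List Char :=
  match rest with
  | [] => pm
  | c :: t => pmLoop t (pm ++ [pymax (pm.getLastD c) c])

def f_alt (s : String) : String :=
  match s.toList with
  | [] => ""   -- unreachable under Pre_f (Python B raises IndexError on s[0] too)
  | c0 :: rest =>
    let pm := pmLoop rest [c0]
    let zipped := rest.zip pm
    let front := (zipped.filter (fun q => q.2.toNat ≤ q.1.toNat)).map Prod.fst
    let back := (zipped.filter (fun q => q.1.toNat < q.2.toNat)).map Prod.fst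
    String.ofList (front.reverse ++ c0 :: back)

-- ===== PRECONDITION & SPEC =====
-- Pre_f excludes only the empty string, on which Python A raises IndexError at s[0].
def Pre_f (s : String) : Prop := s ≠ ""
instance (s : String) : Decidable (Pre_f s) := by unfold Pre_f; infer_instance
def pvWitness_f : String := "ba"

def Spec_f (s : String) (out : String) : Prop := out = f_alt s
instance (s : String) (out : String) : Decidable (Spec_f s out) := by unfold Spec_f; infer_instance

-- ===== CLAIM (what is proved, stated in full; the proofs are below) =====
def Claim_equal_f : Prop := ∀ (s : String), Dom_f s → Pre_f s → Spec_f s (f s)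

-- ===== LEMMAS AND PROOFS =====

-- Proof-side spec of the zipped pairs: each tail char with the running max before it.
def pairs (rest : List Char) (m : Char) : List (Char × Char) :=
  match rest with
  | [] => []
  | c :: t => (c, m) :: pairs t (pymax m c)

-- Proof-side spec of stage 1's appended portion.
def tailMaxes (rest : List Char) (m : Char) : List Char :=
  match rest with
  | [] => []
  | c :: t => pymax m c :: tailMaxes t (pymax m c)

lemma pmLoop_eq (rest : List Char) : ∀ (acc : List Char) (x : Char),
    pmLoop rest (acc ++ [x]) = acc ++ [x] ++ tailMaxes rest x := by
  induction rest with
  | nil => intro acc x; simp [pmLoop, tailMaxes]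
  | cons c t ih =>
    intro acc x
    simp only [pmLoop, tailMaxes]
    have h1 : (acc ++ [x]).getLastD c = x := by simp
    rw [h1]
    have h2 : (acc ++ [x]) ++ [pymax x c] = (acc ++ [x]) ++ [pymax x c] := rfl
    rw [show acc ++ [x] ++ [pymax x c] = (acc ++ [x]) ++ [pymax x c] from rfl] at *
    rw [ih (acc ++ [x]) (pymax x c)]
    simp

lemma zip_tailMaxes (t : List Char) : ∀ (m : Char),
    t.zip (m :: tailMaxes t m) = pairs t m := by
  induction t with
  | nil => intro m; simp [pairs]
  | cons c t' ih =>
    intro m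
    simp only [List.zip_cons_cons, pairs, tailMaxes]
    rw [ih (pymax m c)]

lemma pymax_of_le {m c : Char} (h : m.toNat ≤ c.toNat) : pymax m c = c := by
  unfold pymax
  by_cases h' : m.toNat < c.toNat
  · simp [h']
  · have heq : m.toNat = c.toNat := by omega
    have : m = c := Char.ext (UInt32.toNat_inj.mp heq)
    simp [this]

lemma pymax_of_gt {m c : Char} (h : ¬ m.toNat ≤ c.toNat) : pymax m c = m := by
  unfold pymax
  have : ¬ m.toNat < c.toNat := by omega
  simp [this]

def frontOf (rest : List Char) (m : Char) : List Char :=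
  ((pairs rest m).filter (fun q => q.2.toNat ≤ q.1.toNat)).map Prod.fst

def backOf (rest : List Char) (m : Char) : List Char :=
  ((pairs rest m).filter (fun q => q.1.toNat < q.2.toNat)).map Prod.fst

lemma key (rest : List Char) : ∀ (a : List Char) (m : Char), a ≠ [] → a.headI = m →
    fLoopA rest a = (frontOf rest m).reverse ++ a ++ backOf rest m := by
  induction rest with
  | nil => intro a m _ _; simp [fLoopA, frontOf, backOf, pairs]
  | cons c t ih =>
    intro a m hne hm
    simp only [fLoopA, hm]
    by_cases h : m.toNat ≤ c.toNat
    · simp only [if_pos h]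
      rw [ih (c :: a) c (by simp) (by simp)]
      simp only [frontOf, backOf, pairs, pymax_of_le h, List.filter_cons]
      have hp : decide (m.toNat ≤ c.toNat) = true := by simpa using h
      have hn : decide (c.toNat < m.toNat) = false := by simp; omega
      simp [hp, hn]
    · simp only [if_neg h]
      rw [ih (a ++ [c]) m (by simp) (by cases a with
        | nil => exact absurd rfl hne
        | cons x xs => simpa using hm)]
      simp only [frontOf, backOf, pairs, pymax_of_gt h, List.filter_cons]
      have hp : decide (m.toNat ≤ c.toNat) = false := by simpa using h
      have hn : decide (c.toNat < m.toNat) = true := by simp; omega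
      simp [hp, hn]

-- ===== VERDICT (by name: the statement is the Claim_ definition above) =====
theorem f_spec : Claim_equal_f := by
  intro s _ hpre
  unfold Spec_f f f_alt
  cases hs : s.toList with
  | nil =>
    exfalso; apply hpre
    have h2 := congrArg String.ofList hs
    simpa using h2
  | cons c0 rest =>
    simp only []
    have hpm : pmLoop rest [c0] = [c0] ++ tailMaxes rest c0 := by
      have := pmLoop_eq rest [] c0
      simpa using this
    have hzip : rest.zip (pmLoop rest [c0]) = pairs rest c0 := by
      rw [hpm]; simpa using zip_tailMaxes rest c0
    have hkey := key rest [c0] c0 (by simp) (by simp)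
    rw [hkey]
    simp only [hzip, frontOf, backOf]
    simp
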